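-- pv_equiv track=rewrite | github.com/LakshmiPravalika79/vayuv-autosentry-ey-techathon-6.0 | agents/workers/diagnosis_agent.py | _identify_primary_issue
-- ===== SOURCE A (Python) =====
-- from typing import Dict, Any, List, Optional
--
-- def _identify_primary_issue(anomalies: List[Dict], patterns: List[Dict]) -> tuple:
--     """Identify the primary issue from anomalies and patterns"""
--     if not anomalies and not patterns:
--         return "No significant issues detected", "minor"
--
--     # Prioritize by severity
--     severity_order = {"critical": 4, "high": 3, "warning": 2, "medium": 2, "info": 1, "low": 1}
--
--     all_issues = []
--     for anomaly in anomalies: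
--         all_issues.append({
--             "description": anomaly.get("message", anomaly.get("type", "Unknown")),
--             "severity": anomaly.get("severity", "info"),
--             "type": anomaly.get("type", "unknown")
--         })
--
--     for pattern in patterns:
--         all_issues.append({
--             "description": pattern.get("description", pattern.get("type", "Unknown pattern")),
--             "severity": pattern.get("severity", "medium"),
--             "type": pattern.get("type", "unknown")
--         })
--
--     if not all_issues:
--         return "No significant issues detected", "minor"
--
--     # Sort by severity
--     all_issues.sort(key=lambda x: severity_order.get(x["severity"], 0), reverse=True)
--
--     primary = all_issues[0]
--     severity_map = {"critical": "critical", "high": "major", "warning": "moderate", "medium": "moderate", "info": "minor", "low": "minor"}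
--
--     return primary["description"], severity_map.get(primary["severity"], "minor")
-- ===== SOURCE B (Python) =====
-- from typing import Dict, Any, List, Optional
--
-- def _identify_primary_issue(anomalies: List[Dict], patterns: List[Dict]) -> tuple:
--     """Identify the primary issue from anomalies and patterns (no combined list, no sort)."""
--     if not anomalies and not patterns:
--         return "No significant issues detected", "minor"
--
--     severity_order = {"critical": 4, "high": 3, "warning": 2, "medium": 2, "info": 1, "low": 1}
--     severity_map = {"critical": "critical", "high": "major", "warning": "moderate",
--                     "medium": "moderate", "info": "minor", "low": "minor"}
--
--     def best(records, key1, key2, fallback, default_sev):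
--         # first record reaching the maximum severity rank, with this source's defaults
--         top, top_rank = None, -1
--         for r in records:
--             sev = r.get("severity", default_sev)
--             rank = severity_order.get(sev, 0)
--             if top_rank < rank:
--                 top = (r.get(key1, r.get(key2, fallback)), sev)
--                 top_rank = rank
--         return top, top_rank
--
--     a_best, a_rank = best(anomalies, "message", "type", "Unknown", "info")
--     p_best, p_rank = best(patterns, "description", "type", "Unknown pattern", "medium")
--
--     # a tie goes to the anomaly (the stable sort in A keeps anomalies first)
--     if a_best is None or (p_best is not None and a_rank < p_rank):
--         chosen = p_best
--     else:
--         chosen = a_best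
--
--     return chosen[0], severity_map.get(chosen[1], "minor")
-- ===== Notes on version B (the rewrite author's own statement) =====
-- stated objective: simpler
-- what changed: Replaces building a combined record list and stable-sorting it by severity rank with two single-pass argmax scans (one per source list) combined by a strict comparison that gives ties to anomalies.
import Mathlib
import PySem

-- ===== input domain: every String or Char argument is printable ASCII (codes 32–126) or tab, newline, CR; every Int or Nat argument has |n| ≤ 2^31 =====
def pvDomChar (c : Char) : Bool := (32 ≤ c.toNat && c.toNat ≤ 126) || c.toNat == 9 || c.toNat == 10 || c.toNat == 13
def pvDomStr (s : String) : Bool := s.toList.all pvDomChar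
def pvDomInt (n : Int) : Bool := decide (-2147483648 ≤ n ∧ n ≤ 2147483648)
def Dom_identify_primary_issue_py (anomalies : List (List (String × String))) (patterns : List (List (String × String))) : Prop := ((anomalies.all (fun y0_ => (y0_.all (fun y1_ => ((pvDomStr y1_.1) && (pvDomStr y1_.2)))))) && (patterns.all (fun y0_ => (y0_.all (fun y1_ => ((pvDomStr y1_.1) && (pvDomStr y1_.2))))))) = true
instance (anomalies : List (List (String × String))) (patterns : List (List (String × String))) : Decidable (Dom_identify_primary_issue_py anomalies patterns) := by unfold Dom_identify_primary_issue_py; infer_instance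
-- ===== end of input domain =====

-- B replaces A's combined-list build + stable sort by two single-pass argmax scans combined with a
-- tie-to-anomalies comparison (objective: simpler, same return value).


-- ===== PORT A =====
def A_severity_order : PySem.Dict String Int :=
  ⟨[("critical", 4), ("high", 3), ("warning", 2), ("medium", 2), ("info", 1), ("low", 1)]⟩

def A_severity_map : PySem.Dict String String :=
  ⟨[("critical", "critical"), ("high", "major"), ("warning", "moderate"),
    ("medium", "moderate"), ("info", "minor"), ("low", "minor")]⟩

-- record built for an anomaly: {"description": …, "severity": …, "type": …} as a triple
def A_anomalyRec (a : List (String × String)) : String × String × String :=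
  (PySem.Dict.getD ⟨a⟩ "message" (PySem.Dict.getD ⟨a⟩ "type" "Unknown"),
   PySem.Dict.getD ⟨a⟩ "severity" "info",
   PySem.Dict.getD ⟨a⟩ "type" "unknown")

def A_patternRec (p : List (String × String)) : String × String × String :=
  (PySem.Dict.getD ⟨p⟩ "description" (PySem.Dict.getD ⟨p⟩ "type" "Unknown pattern"),
   PySem.Dict.getD ⟨p⟩ "severity" "medium",
   PySem.Dict.getD ⟨p⟩ "type" "unknown")

def identify_primary_issue_py (anomalies : List (List (String × String))) (patterns : List (List (String × String))) : String × String :=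
  if anomalies = [] ∧ patterns = [] then ("No significant issues detected", "minor")
  else
    let issues1 := anomalies.foldl (fun acc a => acc ++ [A_anomalyRec a]) []
    let all_issues := patterns.foldl (fun acc p => acc ++ [A_patternRec p]) issues1
    if all_issues = [] then ("No significant issues detected", "minor")
    else
      let sortedIssues := PySem.List.sorted all_issues (fun x => PySem.Dict.getD A_severity_order x.2.1 0) true
      match sortedIssues with
      | [] => ("", "")   -- unreachable: all_issues ≠ [] (Python would raise IndexError here)
      | primary :: _ => (primary.1, PySem.Dict.getD A_severity_map primary.2.1 "minor")

-- ===== PORT B =====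
def B_severity_order : PySem.Dict String Int :=
  ⟨[("critical", 4), ("high", 3), ("warning", 2), ("medium", 2), ("info", 1), ("low", 1)]⟩

def B_severity_map : PySem.Dict String String :=
  ⟨[("critical", "critical"), ("high", "major"), ("warning", "moderate"),
    ("medium", "moderate"), ("info", "minor"), ("low", "minor")]⟩

-- first record reaching the maximum severity rank, with this source's defaults
def B_best (records : List (List (String × String))) (key1 key2 fallback default_sev : String) :
    Option (String × String) × Int :=
  records.foldl
    (fun st r =>
      let sev := PySem.Dict.getD ⟨r⟩ "severity" default_sev
      let rank := PySem.Dict.getD B_severity_order sev 0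
      if st.2 < rank then
        (some (PySem.Dict.getD ⟨r⟩ key1 (PySem.Dict.getD ⟨r⟩ key2 fallback), sev), rank)
      else st)
    (none, -1)

def identify_primary_issue_py_alt (anomalies : List (List (String × String))) (patterns : List (List (String × String))) : String × String :=
  if anomalies = [] ∧ patterns = [] then ("No significant issues detected", "minor")
  else
    let ab := B_best anomalies "message" "type" "Unknown" "info"
    let pb := B_best patterns "description" "type" "Unknown pattern" "medium"
    let chosen : Option (String × String) :=
      match ab.1, pb.1 with
      | none, _ => pb.1
      | some a, none => some a
      | some a, some p => if ab.2 < pb.2 then some p else some a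
    match chosen with
    | some c => (c.1, PySem.Dict.getD B_severity_map c.2 "minor")
    | none => ("", "")   -- unreachable given the guard (Python would raise TypeError here)

-- ===== PRECONDITION & SPEC =====
def Spec_identify_primary_issue_py (anomalies : List (List (String × String))) (patterns : List (List (String × String))) (out : String × String) : Prop := out = identify_primary_issue_py_alt anomalies patterns
instance (anomalies : List (List (String × String))) (patterns : List (List (String × String))) (out : String × String) : Decidable (Spec_identify_primary_issue_py anomalies patterns out) := by unfold Spec_identify_primary_issue_py; infer_instance

-- ===== CLAIM (what is proved, stated in full; the proofs are below) =====
def Claim_equal_identify_primary_issue_py : Prop := ∀ (anomalies : List (List (String × String))) (patterns : List (List (String × String))), Dom_identify_primary_issue_py anomalies patterns → Spec_identify_primary_issue_py anomalies patterns (identify_primary_issue_py anomalies patterns)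

-- ===== LEMMAS AND PROOFS =====

-- A's sort key on a built record
def keyA (x : String × String × String) : Int := PySem.Dict.getD A_severity_order x.2.1 0

-- head-evolution step: what the head of the reverse stable insertion sort does per element
def hstep (st : Option (String × String × String)) (x : String × String × String) :
    Option (String × String × String) :=
  match st with
  | none => some x
  | some m => if keyA m < keyA x then some x else some m

theorem head_foldl_insertBy (xs : List (String × String × String))
    (acc : List (String × String × String)) :
    (List.foldl (fun acc x => PySem.List.insertBy (fun a b => decide (keyA b < keyA a)) x acc) acc xs).head?
      = xs.foldl hstep acc.head? := by
  induction xs generalizing acc with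
  | nil => rfl
  | cons x xs ih =>
    simp only [List.foldl_cons, ih]
    congr 1
    cases acc with
    | nil => rfl
    | cons y ys =>
      simp only [PySem.List.insertBy, hstep, List.head?]
      by_cases h : keyA y < keyA x
      · simp [h]
      · simp [h]

theorem rank_nonneg (s : String) : 0 ≤ PySem.Dict.getD A_severity_order s 0 := by
  simp only [A_severity_order, PySem.Dict.getD, PySem.Dict.get?, List.find?]
  repeat' split
  all_goals simp_all

theorem foldl_hstep_ne_none (l : List (String × String × String))
    (m : String × String × String) : List.foldl hstep (some m) l ≠ none := by
  induction l generalizing m with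
  | nil => simp
  | cons x l ih =>
    simp only [List.foldl_cons, hstep]
    by_cases h : keyA m < keyA x
    · simp only [if_pos h]; exact ih x
    · simp only [if_neg h]; exact ih m

theorem foldl_hstep_split (l : List (String × String × String))
    (m : String × String × String) :
    List.foldl hstep (some m) l =
      match List.foldl hstep none l with
      | none => some m
      | some q => if keyA m < keyA q then some q else some m := by
  induction l generalizing m with
  | nil => rfl
  | cons p l ih =>
    have h0 : List.foldl hstep none (p :: l) = List.foldl hstep (some p) l := rfl
    rw [h0, ih p]
    show List.foldl hstep (hstep (some m) p) l = _
    by_cases hmp : keyA m < keyA p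
    · have h1 : hstep (some m) p = some p := by simp [hstep, hmp]
      rw [h1, ih p]
      cases hq : List.foldl hstep none l with
      | none => simp [hmp]
      | some q =>
        by_cases hpq : keyA p < keyA q
        · simp only [if_pos hpq]
          have : keyA m < keyA q := lt_trans hmp hpq
          simp [this]
        · simp only [if_neg hpq]
          simp [hmp]
    · have h1 : hstep (some m) p = some m := by simp [hstep, hmp]
      rw [h1, ih m]
      cases hq : List.foldl hstep none l with
      | none => simp [hmp]
      | some q =>
        by_cases hpq : keyA p < keyA q
        · simp only [if_pos hpq]
        · simp only [if_neg hpq]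
          have : ¬ keyA m < keyA q := by
            have := not_lt.mp hpq
            have := not_lt.mp hmp
            omega
          simp [this, hmp]

-- generic record builder: A builds exactly this triple for each source row
def recG (key1 key2 fallback default_sev : String) (r : List (String × String)) :
    String × String × String :=
  (PySem.Dict.getD ⟨r⟩ key1 (PySem.Dict.getD ⟨r⟩ key2 fallback),
   PySem.Dict.getD ⟨r⟩ "severity" default_sev,
   PySem.Dict.getD ⟨r⟩ "type" "unknown")

-- projection from an A record to B's (description, severity) pair
def projRec (m : String × String × String) : String × String := (m.1, m.2.1)

def rankOf (st : Option (String × String × String)) : Int :=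
  match st with
  | none => -1
  | some m => keyA m

-- the loop body of B_best, named for the proofs
def bstep (key1 key2 fallback default_sev : String)
    (st : Option (String × String) × Int) (r : List (String × String)) :
    Option (String × String) × Int :=
  let sev := PySem.Dict.getD ⟨r⟩ "severity" default_sev
  let rank := PySem.Dict.getD B_severity_order sev 0
  if st.2 < rank then
    (some (PySem.Dict.getD ⟨r⟩ key1 (PySem.Dict.getD ⟨r⟩ key2 fallback), sev), rank)
  else st

theorem B_best_eq_foldl_bstep (records : List (List (String × String)))
    (key1 key2 fallback default_sev : String) :
    B_best records key1 key2 fallback default_sev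
      = records.foldl (bstep key1 key2 fallback default_sev) (none, -1) := rfl

theorem bstep_sim (key1 key2 fallback default_sev : String)
    (st : Option (String × String × String)) (r : List (String × String)) :
    bstep key1 key2 fallback default_sev (st.map projRec, rankOf st) r
      = ((hstep st (recG key1 key2 fallback default_sev r)).map projRec,
         rankOf (hstep st (recG key1 key2 fallback default_sev r))) := by
  have hkey : PySem.Dict.getD B_severity_order (PySem.Dict.getD ⟨r⟩ "severity" default_sev) 0
      = keyA (recG key1 key2 fallback default_sev r) := rfl
  cases st with
  | none =>
    have hc : (-1 : Int) < keyA (recG key1 key2 fallback default_sev r) := by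
      have := rank_nonneg (recG key1 key2 fallback default_sev r).2.1
      unfold keyA
      omega
    simp only [bstep, hstep, Option.map_none, rankOf, hkey]
    rw [if_pos hc]
    rfl
  | some m =>
    simp only [bstep, hstep, Option.map_some, rankOf, hkey]
    by_cases h : keyA m < keyA (recG key1 key2 fallback default_sev r)
    · rw [if_pos h, if_pos h]
      rfl
    · rw [if_neg h, if_neg h]
      rfl

theorem foldl_bstep_sim (records : List (List (String × String)))
    (key1 key2 fallback default_sev : String) (st : Option (String × String × String)) :
    records.foldl (bstep key1 key2 fallback default_sev) (st.map projRec, rankOf st)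
      = (((records.map (recG key1 key2 fallback default_sev)).foldl hstep st).map projRec,
         rankOf ((records.map (recG key1 key2 fallback default_sev)).foldl hstep st)) := by
  induction records generalizing st with
  | nil => rfl
  | cons r records ih =>
    simp only [List.map_cons, List.foldl_cons, bstep_sim]
    exact ih (hstep st (recG key1 key2 fallback default_sev r))

theorem B_best_sim (records : List (List (String × String)))
    (key1 key2 fallback default_sev : String) :
    B_best records key1 key2 fallback default_sev
      = (((records.map (recG key1 key2 fallback default_sev)).foldl hstep none).map projRec,
         rankOf ((records.map (recG key1 key2 fallback default_sev)).foldl hstep none)) := by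
  rw [B_best_eq_foldl_bstep]
  have h0 : ((none : Option (String × String × String)).map projRec,
      rankOf (none : Option (String × String × String)))
      = ((none : Option (String × String)), (-1 : Int)) := rfl
  rw [← h0, foldl_bstep_sim]

theorem A_rec_eq_recG_anom : A_anomalyRec = recG "message" "type" "Unknown" "info" := rfl
theorem A_rec_eq_recG_pat : A_patternRec = recG "description" "type" "Unknown pattern" "medium" := rfl

-- ===== VERDICT (by name: the statement is the Claim_ definition above) =====
theorem identify_primary_issue_py_spec : Claim_equal_identify_primary_issue_py := by
  intro anomalies patterns _
  show identify_primary_issue_py anomalies patterns = identify_primary_issue_py_alt anomalies patterns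
  by_cases hguard : anomalies = [] ∧ patterns = []
  · simp [identify_primary_issue_py, identify_primary_issue_py_alt, hguard]
  · simp only [identify_primary_issue_py, identify_primary_issue_py_alt, if_neg hguard]
    have h1 : anomalies.foldl (fun acc a => acc ++ [A_anomalyRec a]) []
        = anomalies.map (recG "message" "type" "Unknown" "info") := by
      rw [A_rec_eq_recG_anom]
      simpa using PySem.List.foldl_append_singleton_eq_map
        (recG "message" "type" "Unknown" "info") anomalies []
    have h2 : ∀ init : List (String × String × String),
        patterns.foldl (fun acc p => acc ++ [A_patternRec p]) init
        = init ++ patterns.map (recG "description" "type" "Unknown pattern" "medium") := by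
      intro init
      rw [A_rec_eq_recG_pat]
      exact PySem.List.foldl_append_singleton_eq_map
        (recG "description" "type" "Unknown pattern" "medium") patterns init
    set LA := anomalies.map (recG "message" "type" "Unknown" "info") with hLA
    set LP := patterns.map (recG "description" "type" "Unknown pattern" "medium") with hLP
    rw [h1, h2 LA]
    have hne : LA ++ LP ≠ [] := by
      intro hcontra
      rcases List.append_eq_nil_iff.mp hcontra with ⟨ha, hp⟩
      exact hguard ⟨List.map_eq_nil_iff.mp (hLA ▸ ha), List.map_eq_nil_iff.mp (hLP ▸ hp)⟩
    rw [if_neg hne]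
    have hsorted : (PySem.List.sorted (LA ++ LP) (fun x => PySem.Dict.getD A_severity_order x.2.1 0) true).head?
        = List.foldl hstep (List.foldl hstep none LA) LP := by
      have : (fun x : String × String × String => PySem.Dict.getD A_severity_order x.2.1 0) = keyA := rfl
      rw [this, PySem.List.sorted_rev_eq_foldl_insertBy, head_foldl_insertBy (LA ++ LP) [],
        List.foldl_append]
      rfl
    rw [B_best_sim anomalies "message" "type" "Unknown" "info",
      B_best_sim patterns "description" "type" "Unknown pattern" "medium", ← hLA, ← hLP]
    cases hFA : LA.foldl hstep none with
    | none =>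
      rw [hFA] at hsorted
      cases hFP : LP.foldl hstep none with
      | none =>
        exfalso
        have hA0 : LA = [] := by
          cases hL : LA with
          | nil => rfl
          | cons x xs =>
            rw [hL] at hFA
            exact absurd hFA (foldl_hstep_ne_none xs x)
        have hP0 : LP = [] := by
          cases hL : LP with
          | nil => rfl
          | cons x xs =>
            rw [hL] at hFP
            exact absurd hFP (foldl_hstep_ne_none xs x)
        exact hguard ⟨List.map_eq_nil_iff.mp (hLA ▸ hA0), List.map_eq_nil_iff.mp (hLP ▸ hP0)⟩
      | some q =>
        rw [hFP] at hsorted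
        cases hs : PySem.List.sorted (LA ++ LP) (fun x => PySem.Dict.getD A_severity_order x.2.1 0) true with
        | nil => rw [hs] at hsorted; simp at hsorted
        | cons primary rest =>
          rw [hs] at hsorted
          simp only [List.head?] at hsorted
          have hpq : primary = q := by injection hsorted
          subst hpq
          rfl
    | some a =>
      rw [hFA, foldl_hstep_split] at hsorted
      cases hFP : LP.foldl hstep none with
      | none =>
        rw [hFP] at hsorted
        cases hs : PySem.List.sorted (LA ++ LP) (fun x => PySem.Dict.getD A_severity_order x.2.1 0) true with
        | nil => rw [hs] at hsorted; simp at hsorted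
        | cons primary rest =>
          rw [hs] at hsorted
          simp only [List.head?] at hsorted
          have hpq : primary = a := by injection hsorted
          subst hpq
          rfl
      | some q =>
        rw [hFP] at hsorted
        cases hs : PySem.List.sorted (LA ++ LP) (fun x => PySem.Dict.getD A_severity_order x.2.1 0) true with
        | nil =>
          rw [hs] at hsorted
          have hsorted' : (none : Option (String × String × String))
              = if keyA a < keyA q then some q else some a := hsorted
          by_cases hlt : keyA a < keyA q
          · rw [if_pos hlt] at hsorted'; simp at hsorted'
          · rw [if_neg hlt] at hsorted'; simp at hsorted'
        | cons primary rest =>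
          rw [hs] at hsorted
          have hsorted' : some primary = if keyA a < keyA q then some q else some a := hsorted
          simp only [Option.map_some, rankOf]
          by_cases hlt : keyA a < keyA q
          · rw [if_pos hlt] at hsorted'
            have hpq : primary = q := by injection hsorted'
            subst hpq
            simp only [if_pos hlt]
            rfl
          · rw [if_neg hlt] at hsorted'
            have hpq : primary = a := by injection hsorted'
            subst hpq
            simp only [if_neg hlt]
            rfl
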